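-- pv_equiv track=rewrite | github.com/namansehwal/IITM-PYTHON-PROGRAMS | oppe/OPPE_1 Mock-13.py | most_freq
-- ===== SOURCE A (Python) =====
-- def most_freq(M):
--     parent = list()
--     for x in M:
--          parent.extend(x)
--     unique = list(reversed(sorted(list(set(parent)))))
--     y  = max(parent.count(x) for x in unique)
--     for x in unique:
--         if parent.count(x) == y:
--             return x
-- ===== SOURCE B (Python) =====
-- def most_freq(M):
--     counts = {}
--     for row in M:
--         for v in row:
--             counts[v] = counts.get(v, 0) + 1
--     return max(counts, key=lambda v: (counts[v], v))
-- ===== Notes on version B (the rewrite author's own statement) =====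
-- stated objective: faster
-- what changed: Replaces A's sort-of-the-set plus a repeated parent.count scan per distinct value (and a second counting pass to find the answer) with a single counting-dict pass over the matrix followed by one max over the dict keys with key (count, value).
import Mathlib
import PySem

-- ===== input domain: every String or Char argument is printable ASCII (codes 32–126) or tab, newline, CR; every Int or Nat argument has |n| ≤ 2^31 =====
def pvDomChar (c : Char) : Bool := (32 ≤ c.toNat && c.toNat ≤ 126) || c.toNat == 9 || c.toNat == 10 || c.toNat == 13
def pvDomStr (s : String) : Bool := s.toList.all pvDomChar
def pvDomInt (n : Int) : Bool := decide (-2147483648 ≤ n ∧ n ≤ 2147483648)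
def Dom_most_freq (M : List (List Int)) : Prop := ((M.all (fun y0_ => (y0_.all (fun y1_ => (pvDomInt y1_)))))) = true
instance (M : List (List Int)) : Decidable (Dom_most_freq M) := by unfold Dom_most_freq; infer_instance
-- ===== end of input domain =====

-- B replaces A's repeated parent.count scans over a reverse-sorted set with one counting-dict
-- pass and a single key-based max (objective: faster, in a timing run).

-- ===== PORT A =====
def most_freq (M : List (List Int)) : Int :=
  let parent := M.foldl (fun acc x => acc ++ x) []
  let unique := (PySem.List.sorted (PySem.Set.ofList parent) (fun x => x)).reverse
  match PySem.List.max? (unique.map (fun x => (PySem.List.count parent x : Int))) (fun c => c) with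
  | none => 0        -- Python: max() raises ValueError here (empty parent); excluded by Pre_
  | some y =>
    match unique.find? (fun x => (PySem.List.count parent x : Int) == y) with
    | some x => x
    | none => 0      -- unreachable when parent is nonempty (y is attained)

-- ===== PORT B =====
def most_freq_alt (M : List (List Int)) : Int :=
  let counts := M.foldl (fun d row => row.foldl (fun d v => d.insert v (d.getD v 0 + 1)) d)
    (PySem.Dict.empty : PySem.Dict Int Int)
  match PySem.List.max2? counts.keys (fun v => counts.getD v 0) (fun v => v) with
  | some m => m
  | none => 0        -- Python: max() raises ValueError here (empty dict); excluded by Pre_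

-- ===== PRECONDITION & SPEC =====
-- Pre_ excludes exactly the inputs whose flattened matrix is empty: there A's max() over an
-- empty generator raises ValueError (and B's max() over an empty dict raises it too).
def Pre_most_freq (M : List (List Int)) : Prop := M.flatten ≠ []
instance (M : List (List Int)) : Decidable (Pre_most_freq M) := by unfold Pre_most_freq; infer_instance
def pvWitness_most_freq : List (List Int) := [[1, 2], [2]]
def Spec_most_freq (M : List (List Int)) (out : Int) : Prop := out = most_freq_alt M
instance (M : List (List Int)) (out : Int) : Decidable (Spec_most_freq M out) := by unfold Spec_most_freq; infer_instance

-- ===== CLAIM (what is proved, stated in full; the proofs are below) =====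
def Claim_equal_most_freq : Prop := ∀ (M : List (List Int)), Dom_most_freq M → Pre_most_freq M → Spec_most_freq M (most_freq M)

-- ===== LEMMAS AND PROOFS =====

-- the lexicographic order max(…, key=lambda v: (count, v)) maximises
def pvLex (k1 : Int → Int) (a b : Int) : Prop := k1 a < k1 b ∨ (k1 a = k1 b ∧ a ≤ b)

lemma pvLex_trans (k1 : Int → Int) (a b c : Int) (h1 : pvLex k1 a b) (h2 : pvLex k1 b c) :
    pvLex k1 a c := by unfold pvLex at *; omega

-- the step function of PySem.List.max2? with identity second key
def pvF (k1 : Int → Int) (acc : Option Int) (x : Int) : Option Int :=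
  match acc with
  | none => some x
  | some m => if (decide (k1 m < k1 x) || !decide (k1 x < k1 m) && decide (m < x)) = true then some x else some m

lemma pvMax2_eq (xs : List Int) (k1 : Int → Int) :
    PySem.List.max2? xs k1 (fun v => v) = List.foldl (pvF k1) none xs := by
  unfold PySem.List.max2?
  congr 1
  funext acc x
  cases acc <;> rfl

lemma pvStep (k1 : Int → Int) (acc : Option Int) (x : Int) :
    ∃ z, pvF k1 acc x = some z ∧ (z = x ∨ acc = some z) ∧ pvLex k1 x z ∧
      ∀ a, acc = some a → pvLex k1 a z := by
  cases acc with
  | none =>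
    exact ⟨x, rfl, Or.inl rfl, Or.inr ⟨rfl, le_refl x⟩, fun a ha => by cases ha⟩
  | some m0 =>
    by_cases hc : (decide (k1 m0 < k1 x) || !decide (k1 x < k1 m0) && decide (m0 < x)) = true
    · refine ⟨x, by simp [pvF, hc], Or.inl rfl, Or.inr ⟨rfl, le_refl x⟩, ?_⟩
      intro a ha
      injection ha with ha
      subst ha
      simp only [Bool.or_eq_true, Bool.and_eq_true, Bool.not_eq_true', decide_eq_true_eq,
        decide_eq_false_iff_not] at hc
      unfold pvLex; omega
    · refine ⟨m0, by simp [pvF, hc], Or.inr rfl, ?_, ?_⟩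
      · simp only [Bool.or_eq_true, Bool.and_eq_true, Bool.not_eq_true', decide_eq_true_eq,
          decide_eq_false_iff_not] at hc
        unfold pvLex; omega
      · intro a ha; injection ha with ha; subst ha
        exact Or.inr ⟨rfl, le_refl _⟩

lemma pvFold (k1 : Int → Int) : ∀ (xs : List Int) (acc : Option Int) (m : Int),
    List.foldl (pvF k1) acc xs = some m →
    (acc = some m ∨ m ∈ xs) ∧ (∀ a, acc = some a → pvLex k1 a m) ∧ (∀ y ∈ xs, pvLex k1 y m) := by
  intro xs
  induction xs with
  | nil =>
    intro acc m h
    simp only [List.foldl_nil] at h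
    refine ⟨Or.inl h, ?_, by simp⟩
    intro a ha; rw [h] at ha; injection ha with ha; subst ha
    exact Or.inr ⟨rfl, le_refl _⟩
  | cons x t ih =>
    intro acc m h
    obtain ⟨z, hz, hzx, hxz, hacc⟩ := pvStep k1 acc x
    rw [List.foldl_cons, hz] at h
    obtain ⟨h1, h2, h3⟩ := ih (some z) m h
    have hzm : pvLex k1 z m := h2 z rfl
    refine ⟨?_, ?_, ?_⟩
    · cases h1 with
      | inl he =>
        injection he with he; subst he
        cases hzx with
        | inl hx => exact Or.inr (hx ▸ List.mem_cons_self)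
        | inr hx => exact Or.inl hx
      | inr hm => exact Or.inr (List.mem_cons_of_mem x hm)
    · intro a ha; exact pvLex_trans k1 a z m (hacc a ha) hzm
    · intro y hy
      cases List.mem_cons.mp hy with
      | inl hyx => exact hyx ▸ pvLex_trans k1 x z m hxz hzm
      | inr hyt => exact h3 y hyt

lemma pvFold_some (k1 : Int → Int) : ∀ (xs : List Int) (z : Int),
    (List.foldl (pvF k1) (some z) xs).isSome := by
  intro xs
  induction xs with
  | nil => intro z; rfl
  | cons x t ih =>
    intro z
    obtain ⟨w, hw, -, -, -⟩ := pvStep k1 (some z) x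
    rw [List.foldl_cons, hw]
    exact ih w

lemma pvMax2_spec (xs : List Int) (k1 : Int → Int) (m : Int)
    (h : PySem.List.max2? xs k1 (fun v => v) = some m) :
    m ∈ xs ∧ ∀ y ∈ xs, pvLex k1 y m := by
  rw [pvMax2_eq] at h
  obtain ⟨h1, -, h3⟩ := pvFold k1 xs none m h
  cases h1 with
  | inl he => cases he
  | inr hm => exact ⟨hm, h3⟩

-- first hit of find? on a strictly decreasing list is the largest hit
lemma pvFindDesc (p : Int → Bool) : ∀ (l : List Int), List.Pairwise (fun a b => b < a) l →
    ∀ m, l.find? p = some m → ∀ x ∈ l, p x = true → x ≤ m := by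
  intro l
  induction l with
  | nil => intro _ m h; cases h
  | cons a t ih =>
    intro hp m hfind x hx hpx
    obtain ⟨ha, ht⟩ := List.pairwise_cons.mp hp
    by_cases hpa : p a = true
    · rw [List.find?_cons_of_pos hpa] at hfind
      injection hfind with hfind; subst hfind
      cases List.mem_cons.mp hx with
      | inl h => exact h.le
      | inr h => exact (ha x h).le
    · rw [List.find?_cons_of_neg (by simpa using hpa)] at hfind
      cases List.mem_cons.mp hx with
      | inl h => exact absurd (h ▸ hpx) hpa
      | inr h => exact ih ht m hfind x h hpx

def pvC (P : List Int) : Int → Int := fun x => (PySem.List.count P x : Int)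

lemma pvA_char (M : List (List Int)) (h : M.flatten ≠ []) :
    most_freq M ∈ PySem.Set.ofList M.flatten ∧
      ∀ y ∈ PySem.Set.ofList M.flatten, pvLex (pvC M.flatten) y (most_freq M) := by
  obtain ⟨x0, hx0⟩ := List.exists_mem_of_ne_nil _ h
  have hS_ne : PySem.Set.ofList M.flatten ≠ [] := by
    intro hnil
    have hx : x0 ∈ PySem.Set.ofList M.flatten := (PySem.Set.mem_ofList _ _).mpr hx0
    rw [hnil] at hx; simp at hx
  have hU_ne : (PySem.List.sorted (PySem.Set.ofList M.flatten) (fun x => x)).reverse ≠ [] := by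
    simp only [ne_eq, List.reverse_eq_nil_iff, PySem.List.sorted_eq_nil_iff]
    exact hS_ne
  have hU_pair : ((PySem.List.sorted (PySem.Set.ofList M.flatten) (fun x => x)).reverse).Pairwise
      (fun a b => b < a) := by
    rw [List.pairwise_reverse]
    exact PySem.List.sorted_ofList_pairwise_lt M.flatten
  cases hy : PySem.List.max?
      (((PySem.List.sorted (PySem.Set.ofList M.flatten) (fun x => x)).reverse).map
        (fun x => (PySem.List.count M.flatten x : Int))) (fun c => c) with
  | none =>
    rw [PySem.List.max?_eq_none_iff, List.map_eq_nil_iff] at hy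
    exact absurd hy hU_ne
  | some y =>
    have hy_mem := PySem.List.max?_mem hy
    have hy_max := PySem.List.max?_isMax hy
    cases hfind : ((PySem.List.sorted (PySem.Set.ofList M.flatten) (fun x => x)).reverse).find?
        (fun x => (PySem.List.count M.flatten x : Int) == y) with
    | none =>
      exfalso
      rw [List.find?_eq_none] at hfind
      obtain ⟨x1, hx1, hx1y⟩ := List.mem_map.mp hy_mem
      exact hfind x1 hx1 (by simpa using hx1y)
    | some m =>
      have hval : most_freq M = m := by
        simp only [most_freq, PySem.List.foldl_append_eq_flatten, List.nil_append, hy, hfind]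
      rw [hval]
      have hmU := List.mem_of_find?_eq_some hfind
      have hmS : m ∈ PySem.Set.ofList M.flatten :=
        (PySem.List.mem_sorted _ _ _ _).mp (List.mem_reverse.mp hmU)
      have hcm : pvC M.flatten m = y := by
        have := List.find?_some hfind
        simpa [pvC] using this
      refine ⟨hmS, ?_⟩
      intro z hz
      have hzU : z ∈ (PySem.List.sorted (PySem.Set.ofList M.flatten) (fun x => x)).reverse :=
        List.mem_reverse.mpr ((PySem.List.mem_sorted _ _ _ _).mpr hz)
      have hle : pvC M.flatten z ≤ y := hy_max _ (List.mem_map_of_mem hzU)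
      by_cases hlt : pvC M.flatten z < pvC M.flatten m
      · exact Or.inl hlt
      · have heq : pvC M.flatten z = pvC M.flatten m := by
          unfold pvC at *; omega
        refine Or.inr ⟨heq, ?_⟩
        exact pvFindDesc _ _ hU_pair m hfind z hzU (by simp [pvC] at heq ⊢; rw [heq]; simpa [pvC] using hcm)

lemma pvB_char (M : List (List Int)) (h : M.flatten ≠ []) :
    most_freq_alt M ∈ PySem.Set.ofList M.flatten ∧
      ∀ y ∈ PySem.Set.ofList M.flatten, pvLex (pvC M.flatten) y (most_freq_alt M) := by
  obtain ⟨x0, hx0⟩ := List.exists_mem_of_ne_nil _ h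
  have hS_ne : PySem.Set.ofList M.flatten ≠ [] := by
    intro hnil
    have hx : x0 ∈ PySem.Set.ofList M.flatten := (PySem.Set.mem_ofList _ _).mpr hx0
    rw [hnil] at hx; simp at hx
  have hcounts : M.foldl (fun d row => row.foldl (fun d v => d.insert v (d.getD v 0 + 1)) d)
      (PySem.Dict.empty : PySem.Dict Int Int) = PySem.Dict.counter M.flatten := by
    rw [← List.foldl_flatten]
    exact PySem.Dict.foldl_insert_getD_add_one_eq_counter M.flatten
  have hk : (fun v => (PySem.Dict.counter M.flatten).getD v 0) = pvC M.flatten := by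
    funext v
    rw [PySem.Dict.getD_counter]
    simp [pvC, PySem.List.count_eq]
  cases hm : PySem.List.max2? (PySem.Dict.counter M.flatten).keys (pvC M.flatten) (fun v => v) with
  | none =>
    exfalso
    rw [PySem.Dict.keys_counter] at hm
    cases hSl : PySem.Set.ofList M.flatten with
    | nil => exact hS_ne hSl
    | cons s0 tS =>
      rw [hSl, pvMax2_eq, List.foldl_cons] at hm
      obtain ⟨w, hw, -, -, -⟩ := pvStep (pvC M.flatten) none s0
      rw [hw] at hm
      have := pvFold_some (pvC M.flatten) tS w
      rw [hm] at this; cases this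
  | some m =>
    have hval : most_freq_alt M = m := by
      simp only [most_freq_alt, hcounts, hk, hm]
    rw [hval]
    rw [PySem.Dict.keys_counter] at hm
    obtain ⟨h1, h2⟩ := pvMax2_spec _ _ _ hm
    exact ⟨h1, h2⟩

lemma pvMain (M : List (List Int)) (h : M.flatten ≠ []) : most_freq M = most_freq_alt M := by
  obtain ⟨hA1, hA2⟩ := pvA_char M h
  obtain ⟨hB1, hB2⟩ := pvB_char M h
  have ha := hA2 _ hB1
  have hb := hB2 _ hA1
  unfold pvLex at ha hb
  omega

-- ===== VERDICT (by name: the statement is the Claim_ definition above) =====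
theorem most_freq_spec : Claim_equal_most_freq := by
  intro M _ hPre
  unfold Spec_most_freq
  exact pvMain M hPre
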